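-- pv_equiv track=rewrite | github.com/rf-iasys/OEIS | OEIS_A047311.py | generate_sieve_gen
-- ===== SOURCE A (Python) =====
-- def generate_sieve_gen(n_max):
--     x = 1
--     marked_set = set()  # fast membership check
--
--     while True:
--         marked_number = x + 3
--         if marked_number > n_max:
--             break
--
--         # yield the marked number
--         yield marked_number
--         marked_set.add(marked_number)
--
--         # find next unmarked x
--         x += 1
--         while x in marked_set:
--             x += 2
-- ===== SOURCE B (Python) =====
-- def generate_sieve_gen(n_max):
--     # Direct arithmetic progression: terms are exactly the integers == 4,5,6 (mod 7).
--     base = 4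
--     while base <= n_max:
--         for m in (base, base + 1, base + 2):
--             if m <= n_max:
--                 yield m
--         base += 7
-- ===== Notes on version B (the rewrite author's own statement) =====
-- stated objective: faster
-- what changed: Replaces A's self-sieve (a growing marked set plus a skip-scan to find the next unmarked x) with direct emission of the terms as blocks of three consecutive integers, one block per period of seven, keeping O(1) state.
import Mathlib
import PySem

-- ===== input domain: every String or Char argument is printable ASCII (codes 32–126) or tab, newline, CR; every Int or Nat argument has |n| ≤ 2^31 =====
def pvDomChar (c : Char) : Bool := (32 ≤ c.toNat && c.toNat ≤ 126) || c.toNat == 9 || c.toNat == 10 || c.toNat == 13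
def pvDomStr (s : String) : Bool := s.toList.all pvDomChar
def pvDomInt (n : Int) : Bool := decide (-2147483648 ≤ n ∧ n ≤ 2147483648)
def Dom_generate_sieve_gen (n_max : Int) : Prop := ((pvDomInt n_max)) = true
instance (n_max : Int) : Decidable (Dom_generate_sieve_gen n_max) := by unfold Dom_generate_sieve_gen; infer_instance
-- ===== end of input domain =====

-- B replaces A's self-sieve (growing marked set, skip-scan for the next unmarked x) by directly
-- emitting the terms as blocks of three consecutive integers, one block per period of seven —
-- same list, O(1) state instead of a set.

-- ===== PORT A =====
-- inner 'while x in marked_set: x += 2'; fuel-guarded (the generous fuel never runs out)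
def sieveNext (fuel : Nat) (marked : PySem.Set Int) (x : Int) : Int :=
  match fuel with
  | 0 => x
  | fuel + 1 => if PySem.Set.contains marked x then sieveNext fuel marked (x + 2) else x

lemma le_sieveNext (fuel : Nat) (marked : PySem.Set Int) (x : Int) :
    x ≤ sieveNext fuel marked x := by
  induction fuel generalizing x with
  | zero => simp [sieveNext]
  | succ f ih =>
    simp only [sieveNext]
    split
    · exact le_trans (by omega) (ih (x + 2))
    · exact le_refl x

-- outer 'while True' loop of A ('marked_number' = x + 3, written inline)
def sieveLoop (n_max : Int) (x : Int) (marked : PySem.Set Int) (acc : List Int) : List Int :=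
  if _h : x + 3 > n_max then acc
  else
    sieveLoop n_max
      (sieveNext (n_max + 7).toNat (PySem.Set.add marked (x + 3)) (x + 1))
      (PySem.Set.add marked (x + 3))
      (acc ++ [x + 3])
termination_by (n_max + 3 - x).toNat
decreasing_by
  have := le_sieveNext (n_max + 7).toNat (PySem.Set.add marked (x + 3)) (x + 1)
  omega

def generate_sieve_gen (n_max : Int) : List Int :=
  sieveLoop n_max 1 PySem.Set.empty []

-- ===== PORT B =====
def altLoop (n_max : Int) (base : Int) : List Int :=
  if _h : base ≤ n_max then
    ([base, base + 1, base + 2].foldl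
        (fun acc m => if m ≤ n_max then acc ++ [m] else acc) [])
      ++ altLoop n_max (base + 7)
  else []
termination_by (n_max + 1 - base).toNat
decreasing_by omega

def generate_sieve_gen_alt (n_max : Int) : List Int := altLoop n_max 4

-- ===== PRECONDITION & SPEC =====
def Spec_generate_sieve_gen (n_max : Int) (out : List Int) : Prop := out = generate_sieve_gen_alt n_max
instance (n_max : Int) (out : List Int) : Decidable (Spec_generate_sieve_gen n_max out) := by unfold Spec_generate_sieve_gen; infer_instance

-- ===== CLAIM (what is proved, stated in full; the proofs are below) =====
def Claim_equal_generate_sieve_gen : Prop := ∀ (n_max : Int), Dom_generate_sieve_gen n_max → Spec_generate_sieve_gen n_max (generate_sieve_gen n_max)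

-- ===== LEMMAS AND PROOFS =====

-- the marked set after j full blocks of A's loop
def blocks : Nat → List Int
  | 0 => []
  | j + 1 => blocks j ++ [7 * (j : Int) + 4, 7 * (j : Int) + 5, 7 * (j : Int) + 6]

lemma mem_blocks {m : Int} {j : Nat} (h : m ∈ blocks j) :
    (m % 7 = 4 ∨ m % 7 = 5 ∨ m % 7 = 6) ∧ m < 7 * j := by
  induction j with
  | zero => simp [blocks] at h
  | succ i ih =>
    simp only [blocks, List.mem_append, List.mem_cons, List.not_mem_nil, or_false] at h
    rcases h with h | h | h | h
    · have := ih h; push_cast; omega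
    all_goals (subst h; push_cast; constructor <;> omega)

lemma contains_false {s : PySem.Set Int} {x : Int} (h : x ∉ s) :
    PySem.Set.contains s x = false := by
  cases hc : PySem.Set.contains s x
  · rfl
  · exact absurd ((PySem.Set.contains_iff s x).mp hc) h

lemma sieveNext_not_mem {f : Nat} {s : PySem.Set Int} {x : Int} (h : x ∉ s) :
    sieveNext f s x = x := by
  cases f with
  | zero => rfl
  | succ f => simp only [sieveNext, contains_false h, Bool.false_eq_true, if_false]

lemma sieveNext_mem {f : Nat} {s : PySem.Set Int} {x : Int} (h : x ∈ s) :
    sieveNext (f + 1) s x = sieveNext f s (x + 2) := by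
  simp only [sieveNext, (PySem.Set.contains_iff s x).mpr h, if_true]

lemma blocks_add3 (j : Nat) :
    PySem.Set.add (PySem.Set.add (PySem.Set.add (blocks j)
      (7 * (j : Int) + 4)) (7 * (j : Int) + 5)) (7 * (j : Int) + 6) = blocks (j + 1) := by
  have h4 : (7 * (j : Int) + 4) ∉ blocks j := fun h => by have := (mem_blocks h).2; omega
  have h5 : (7 * (j : Int) + 5) ∉ blocks j ++ [7 * (j : Int) + 4] := by
    intro h
    rcases List.mem_append.mp h with h | h
    · have := (mem_blocks h).2; omega
    · simp only [List.mem_singleton] at h; omega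
  have h6 : (7 * (j : Int) + 6) ∉ blocks j ++ [7 * (j : Int) + 4] ++ [7 * (j : Int) + 5] := by
    intro h
    rcases List.mem_append.mp h with h | h
    · rcases List.mem_append.mp h with h | h
      · have := (mem_blocks h).2; omega
      · simp only [List.mem_singleton] at h; omega
    · simp only [List.mem_singleton] at h; omega
  rw [PySem.Set.add_of_not_mem h4, PySem.Set.add_of_not_mem h5, PySem.Set.add_of_not_mem h6]
  simp [blocks]

-- three outer iterations of A's loop produce one block of B's loop
lemma sieve_eq_alt (n_max : Int) (k : Nat) :
    ∀ (j : Nat) (acc : List Int), (n_max - 7 * (j : Int)).toNat ≤ k →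
      sieveLoop n_max (7 * (j : Int) + 1) (blocks j) acc
        = acc ++ altLoop n_max (7 * (j : Int) + 4) := by
  induction k with
  | zero =>
    intro j acc hk
    rw [sieveLoop, dif_pos (by omega)]
    rw [altLoop, dif_neg (by omega)]
    simp
  | succ k ih =>
    intro j acc hk
    by_cases h4 : 7 * (j : Int) + 4 > n_max
    · rw [sieveLoop, dif_pos (by omega)]
      rw [altLoop, dif_neg (by omega)]
      simp
    · rw [sieveLoop, dif_neg (by omega)]
      obtain ⟨f, hf⟩ : ∃ f, (n_max + 7).toNat = f + 3 := ⟨(n_max + 7).toNat - 3, by omega⟩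
      have m1 : (7 * (j : Int) + 1 + 1) ∉ PySem.Set.add (blocks j) (7 * (j : Int) + 1 + 3) := by
        intro h
        rcases (PySem.Set.mem_add _ _ _).mp h with h | h
        · have := (mem_blocks h).1; omega
        · omega
      rw [sieveNext_not_mem m1,
          show 7 * (j : Int) + 1 + 3 = 7 * (j : Int) + 4 from by ring]
      by_cases h5 : 7 * (j : Int) + 5 > n_max
      · rw [sieveLoop, dif_pos (show 7 * (j : Int) + 1 + 1 + 3 > n_max from by omega)]
        conv_rhs => rw [altLoop]
        rw [dif_pos (by omega)]
        simp only [List.foldl]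
        rw [if_neg (show ¬(7 * (j : Int) + 4 + 2 ≤ n_max) from by omega),
            if_neg (show ¬(7 * (j : Int) + 4 + 1 ≤ n_max) from by omega),
            if_pos (show 7 * (j : Int) + 4 ≤ n_max from by omega)]
        rw [altLoop, dif_neg (by omega)]
        simp
      · rw [sieveLoop, dif_neg (by omega)]
        have m2 : (7 * (j : Int) + 1 + 1 + 1) ∉
            PySem.Set.add (PySem.Set.add (blocks j) (7 * (j : Int) + 4))
              (7 * (j : Int) + 1 + 1 + 3) := by
          intro h
          rcases (PySem.Set.mem_add _ _ _).mp h with h | h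
          · rcases (PySem.Set.mem_add _ _ _).mp h with h | h
            · have := (mem_blocks h).1; omega
            · omega
          · omega
        rw [sieveNext_not_mem m2,
            show 7 * (j : Int) + 1 + 1 + 3 = 7 * (j : Int) + 5 from by ring]
        by_cases h6 : 7 * (j : Int) + 6 > n_max
        · rw [sieveLoop, dif_pos (show 7 * (j : Int) + 1 + 1 + 1 + 3 > n_max from by omega)]
          conv_rhs => rw [altLoop]
          rw [dif_pos (by omega)]
          simp only [List.foldl]
          rw [if_neg (show ¬(7 * (j : Int) + 4 + 2 ≤ n_max) from by omega),
              if_pos (show 7 * (j : Int) + 4 + 1 ≤ n_max from by omega),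
              if_pos (show 7 * (j : Int) + 4 ≤ n_max from by omega)]
          rw [altLoop, dif_neg (by omega)]
          rw [show 7 * (j : Int) + 4 + 1 = 7 * (j : Int) + 5 from by ring]
          simp
        · rw [sieveLoop, dif_neg (by omega),
              show 7 * (j : Int) + 1 + 1 + 1 + 3 = 7 * (j : Int) + 6 from by ring,
              blocks_add3 j]
          have mm4 : (7 * (j : Int) + 1 + 1 + 1 + 1) ∈ blocks (j + 1) := by
            rw [show 7 * (j : Int) + 1 + 1 + 1 + 1 = 7 * (j : Int) + 4 from by ring]
            simp [blocks]
          have mm6 : (7 * (j : Int) + 1 + 1 + 1 + 1 + 2) ∈ blocks (j + 1) := by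
            rw [show 7 * (j : Int) + 1 + 1 + 1 + 1 + 2 = 7 * (j : Int) + 6 from by ring]
            simp [blocks]
          have mm8 : (7 * (j : Int) + 1 + 1 + 1 + 1 + 2 + 2) ∉ blocks (j + 1) := by
            intro h
            have := (mem_blocks h).1
            have he : 7 * (j : Int) + 1 + 1 + 1 + 1 + 2 + 2 = 7 * ((j : Int) + 1) + 1 := by ring
            rw [he] at this; omega
          rw [hf, sieveNext_mem mm4, sieveNext_mem mm6, sieveNext_not_mem mm8,
              show 7 * (j : Int) + 1 + 1 + 1 + 1 + 2 + 2 = 7 * ((j + 1 : Nat) : Int) + 1 from by push_cast; ring,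
              ih (j + 1) _ (by push_cast at hk ⊢; omega),
              show 7 * ((j + 1 : Nat) : Int) + 4 = 7 * (j : Int) + 4 + 7 from by push_cast; ring]
          conv_rhs => rw [altLoop]
          rw [dif_pos (by omega)]
          simp only [List.foldl]
          rw [if_pos (show 7 * (j : Int) + 4 + 2 ≤ n_max from by omega),
              if_pos (show 7 * (j : Int) + 4 + 1 ≤ n_max from by omega),
              if_pos (show 7 * (j : Int) + 4 ≤ n_max from by omega),
              show 7 * (j : Int) + 4 + 1 = 7 * (j : Int) + 5 from by ring,
              show 7 * (j : Int) + 4 + 2 = 7 * (j : Int) + 6 from by ring]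
          simp

-- ===== VERDICT (by name: the statement is the Claim_ definition above) =====
theorem generate_sieve_gen_spec : Claim_equal_generate_sieve_gen := by
  intro n_max _
  unfold Spec_generate_sieve_gen generate_sieve_gen generate_sieve_gen_alt
  have h := sieve_eq_alt n_max n_max.toNat 0 [] (by omega)
  simpa [blocks, PySem.Set.empty] using h
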